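-- pv_equiv track=rewrite | github.com/Amir-Moris/Text-Driven-Image-to-Image-Generation | Dataset_Generation/Textual Dataset Generation/main.py | perform_affects_changes
-- ===== SOURCE A (Python) =====
-- season_changes = [
--     ("in snow", "add snow effects"),
--     ("in spring", "add spring effects"),
--     ("in summer", "add summer effects"),
--     ("in autumn", "add autumn effects"),
--     ("during daytime", "make the scene in daytime"),
--     ("during nighttime", "make the period in nighttime"),
-- ]
--
-- background_changes = [
--     ("in front of a mountain", "add mountain in the background"),
--     ("in front of the pyramids", "add the pyramids in the background"),
-- ]
--
-- PRODUCTS = [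
--     "t-shirt",
--     "shirt",
--     "dress",
--     "pants",
--     "shoe",
--     "watch",
--     "vase",
--     "sneaker",
--     "headphone",
--     "bottle",
--     "perfume",
--     "vase",
--     "cup",
--     "camera",
--     "phone",
--     "mobile",
--     "bag",
--     "earpod",
--     "earbud",
--     "heel",
-- ]
--
-- def find_words(lst, input):
--     found_words = []
--     for w in lst:
--         indx = input.find(w)
--         if indx != -1:
--             if indx + len(w) + 1 < len(input) and input[indx + len(w) + 1] == "s":
--                 w += "s"
--
--             found_words.append(w)
--
--     return found_words
--
-- def perform_affects_changes(input):
--     original_input = input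
--     for change, _ in background_changes:
--         input = input.replace(change, "")
--
--     result = []
--     found_words = find_words(PRODUCTS, input)
--
--     for _ in found_words:
--         for change, change_text in season_changes:
--             edit = change_text
--             output = input + " " + change
--
--             result.append(
--                 {
--                     "caption": original_input,
--                     "edit": edit,
--                     "output": output.replace("  ", " "),
--                 }
--             )
--
--         break
--     return result
-- ===== SOURCE B (Python) =====
-- season_changes = [
--     ("in snow", "add snow effects"),
--     ("in spring", "add spring effects"),
--     ("in summer", "add summer effects"),
--     ("in autumn", "add autumn effects"),
--     ("during daytime", "make the scene in daytime"),
--     ("during nighttime", "make the period in nighttime"),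
-- ]
--
-- background_changes = [
--     ("in front of a mountain", "add mountain in the background"),
--     ("in front of the pyramids", "add the pyramids in the background"),
-- ]
--
-- PRODUCTS = [
--     "t-shirt", "shirt", "dress", "pants", "shoe", "watch", "vase", "sneaker",
--     "headphone", "bottle", "perfume", "vase", "cup", "camera", "phone",
--     "mobile", "bag", "earpod", "earbud", "heel",
-- ]
--
-- def _strip_backgrounds(s, changes):
--     # recursive staged removal of background phrases
--     if not changes:
--         return s
--     return _strip_backgrounds(s.replace(changes[0][0], ""), changes[1:])
--
-- def _contains_product(s):
--     # single left-to-right positional scan: at each position, test whether some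
--     # product name starts there (prefix tests instead of per-product substring search)
--     for i in range(len(s)):
--         tail = s[i:]
--         for p in PRODUCTS:
--             if tail.startswith(p):
--                 return True
--     return False
--
-- def _build_edits(original, cleaned, changes):
--     # recursive construction of the edit records
--     if not changes:
--         return []
--     phrase, edit = changes[0]
--     entry = {
--         "caption": original,
--         "edit": edit,
--         "output": (cleaned + " " + phrase).replace("  ", " "),
--     }
--     return [entry] + _build_edits(original, cleaned, changes[1:])
--
-- def perform_affects_changes(input):
--     cleaned = _strip_backgrounds(input, background_changes)
--     if not _contains_product(cleaned):
--         return []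
--     return _build_edits(input, cleaned, season_changes)
-- ===== Notes on version B (the rewrite author's own statement) =====
-- stated objective: alternative
-- what changed: Replaces find_words (per-product substring search with plural-suffix bookkeeping, tested for emptiness via a for/break loop) by a single left-to-right positional scan doing prefix tests at each index, and rebuilds the background stripping and result construction as recursive helpers instead of foldl-style loops.
import Mathlib
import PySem

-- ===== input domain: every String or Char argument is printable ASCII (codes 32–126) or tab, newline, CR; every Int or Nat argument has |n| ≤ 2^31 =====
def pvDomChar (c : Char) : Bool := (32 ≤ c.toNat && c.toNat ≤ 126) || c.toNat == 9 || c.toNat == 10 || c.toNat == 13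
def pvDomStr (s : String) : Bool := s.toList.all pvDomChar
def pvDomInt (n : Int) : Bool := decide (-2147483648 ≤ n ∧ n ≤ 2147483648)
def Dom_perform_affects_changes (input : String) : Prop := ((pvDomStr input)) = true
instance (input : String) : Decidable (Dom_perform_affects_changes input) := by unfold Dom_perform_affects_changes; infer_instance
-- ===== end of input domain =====

-- B restructures A: recursive staged background removal, a positional left-to-right scan
-- with prefix tests instead of per-product substring search with plural bookkeeping, and a
-- recursive builder of the edit records (alternative decomposition, same cost).
-- ===== PORT A =====
def pySeasonChanges : List (String × String) :=
  [("in snow", "add snow effects"),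
   ("in spring", "add spring effects"),
   ("in summer", "add summer effects"),
   ("in autumn", "add autumn effects"),
   ("during daytime", "make the scene in daytime"),
   ("during nighttime", "make the period in nighttime")]

def pyBackgroundChanges : List (String × String) :=
  [("in front of a mountain", "add mountain in the background"),
   ("in front of the pyramids", "add the pyramids in the background")]

def pyPRODUCTS : List String :=
  ["t-shirt", "shirt", "dress", "pants", "shoe", "watch", "vase", "sneaker",
   "headphone", "bottle", "perfume", "vase", "cup", "camera", "phone",
   "mobile", "bag", "earpod", "earbud", "heel"]

def find_words (lst : List String) (input : String) : List String :=
  lst.foldl (fun found_words w =>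
    let indx := PySem.Str.find input w
    if indx ≠ -1 then
      let w := if indx + (PySem.Str.len w : Int) + 1 < (PySem.Str.len input : Int)
                  ∧ PySem.Str.pyGet? input (indx + (PySem.Str.len w : Int) + 1) = some 's'
               then w ++ "s" else w
      found_words ++ [w]
    else found_words) []

def perform_affects_changes (input : String) : List (List (String × String)) :=
  let original_input := input
  let input := pyBackgroundChanges.foldl (fun inp c => PySem.Str.replace inp c.1 "") input
  let result : List (List (String × String)) := []
  let found_words := find_words pyPRODUCTS input
  match found_words with
  | [] => result
  | _ :: _ =>
      -- 'for _ in found_words: … break' runs the inner loop once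
      pySeasonChanges.foldl (fun result c =>
        let edit := c.2
        let output := input ++ " " ++ c.1
        result ++ [[("caption", original_input), ("edit", edit),
                    ("output", PySem.Str.replace output "  " " ")]]) result

-- ===== PORT B =====
def stripBackgrounds (s : String) : List (String × String) → String
  | [] => s
  | c :: rest => stripBackgrounds (PySem.Str.replace s c.1 "") rest

def containsProduct (s : String) : Bool :=
  -- range(len(s)): PySem.Str.len is Python's len (an Int, always ≥ 0), hence .toNat
  (List.range (PySem.Str.len s).toNat).any (fun i =>
    let tail := PySem.Str.slice s (some (i : Int)) none
    pyPRODUCTS.any (fun p => PySem.Str.startswith tail p))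

def buildEdits (original cleaned : String) : List (String × String) → List (List (String × String))
  | [] => []
  | c :: rest =>
      [("caption", original), ("edit", c.2),
       ("output", PySem.Str.replace (cleaned ++ " " ++ c.1) "  " " ")]
        :: buildEdits original cleaned rest

def perform_affects_changes_alt (input : String) : List (List (String × String)) :=
  let cleaned := stripBackgrounds input pyBackgroundChanges
  if !containsProduct cleaned then []
  else buildEdits input cleaned pySeasonChanges

-- ===== PRECONDITION & SPEC =====
def Spec_perform_affects_changes (input : String) (out : List (List (String × String))) : Prop := out = perform_affects_changes_alt input
instance (input : String) (out : List (List (String × String))) : Decidable (Spec_perform_affects_changes input out) := by unfold Spec_perform_affects_changes; infer_instance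

-- ===== CLAIM (what is proved, stated in full; the proofs are below) =====
def Claim_equal_perform_affects_changes : Prop := ∀ (input : String), Dom_perform_affects_changes input → Spec_perform_affects_changes input (perform_affects_changes input)

-- ===== LEMMAS AND PROOFS =====

-- B's recursive background removal is A's foldl
lemma stripBackgrounds_eq_foldl (l : List (String × String)) (s : String) :
    stripBackgrounds s l = l.foldl (fun inp c => PySem.Str.replace inp c.1 "") s := by
  induction l generalizing s with
  | nil => rfl
  | cons h t ih => simp [stripBackgrounds, ih]

-- find_words is an 'if found then append' loop: it equals the filtered, mapped product list
lemma find_words_go (lst : List String) (input : String) (acc : List String) :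
    lst.foldl (fun found_words w =>
      let indx := PySem.Str.find input w
      if indx ≠ -1 then
        let w := if indx + (PySem.Str.len w : Int) + 1 < (PySem.Str.len input : Int)
                    ∧ PySem.Str.pyGet? input (indx + (PySem.Str.len w : Int) + 1) = some 's'
                 then w ++ "s" else w
        found_words ++ [w]
      else found_words) acc
      = acc ++ (lst.filter (fun w => PySem.Str.find input w != -1)).map (fun w =>
          if PySem.Str.find input w + (PySem.Str.len w : Int) + 1 < (PySem.Str.len input : Int)
              ∧ PySem.Str.pyGet? input (PySem.Str.find input w + (PySem.Str.len w : Int) + 1) = some 's'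
          then w ++ "s" else w) := by
  induction lst generalizing acc with
  | nil => simp
  | cons h t ih =>
      simp only [List.foldl_cons, List.filter_cons]
      simp at ih
      by_cases hp : PySem.Chars.find input.toList h.toList = -1
      · simp [hp, ih]
      · simp [hp, ih]

-- A's existence test (find_words nonempty) equals substring containment of some product
lemma find_words_nil_iff (input : String) :
    find_words pyPRODUCTS input = [] ↔
      ∀ p ∈ pyPRODUCTS, ¬ p.toList <:+: input.toList := by
  unfold find_words
  rw [find_words_go]
  simp only [List.nil_append, List.map_eq_nil_iff, List.filter_eq_nil_iff,
    bne_iff_ne, ne_eq, not_not, PySem.Str.find_eq, PySem.Chars.find_eq_neg_one_iff]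

-- no product name is empty
lemma pyPRODUCTS_ne_nil : ∀ p ∈ pyPRODUCTS, p.toList ≠ [] := by decide

-- B's positional prefix scan equals substring containment of some product
lemma containsProduct_iff (s : String) :
    containsProduct s = true ↔ ∃ p ∈ pyPRODUCTS, p.toList <:+: s.toList := by
  unfold containsProduct
  simp only [List.any_eq_true, List.mem_range, PySem.Str.startswith_eq,
    PySem.Str.toList_slice, PySem.Chars.slice_eq_listSlice, PySem.Str.len_eq,
    Int.toNat_natCast, PySem.List.slice_from_natCast,
    PySem.Chars.startswith_iff]
  constructor
  · rintro ⟨i, _, p, hp, hpre⟩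
    exact ⟨p, hp, (PySem.Chars.isIn_iff_infix p.toList s.toList).mp
      ((PySem.Chars.exists_prefix_drop_iff_isIn p.toList s.toList).mp ⟨i, hpre⟩)⟩
  · rintro ⟨p, hp, hinf⟩
    obtain ⟨j, hpre⟩ := (PySem.Chars.exists_prefix_drop_iff_isIn p.toList s.toList).mpr
      ((PySem.Chars.isIn_iff_infix p.toList s.toList).mpr hinf)
    by_cases hj : j < s.toList.length
    · exact ⟨j, hj, p, hp, hpre⟩
    · exfalso
      have hdrop : List.drop j s.toList = [] := List.drop_eq_nil_of_le (by omega)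
      rw [hdrop] at hpre
      exact pyPRODUCTS_ne_nil p hp (List.prefix_nil.mp hpre)

-- B's recursive builder equals A's foldl-append loop
lemma buildEdits_eq (original cleaned : String) (l : List (String × String))
    (acc : List (List (String × String))) :
    l.foldl (fun result c =>
      result ++ [[("caption", original), ("edit", c.2),
                  ("output", PySem.Str.replace (cleaned ++ " " ++ c.1) "  " " ")]]) acc
      = acc ++ buildEdits original cleaned l := by
  induction l generalizing acc with
  | nil => simp [buildEdits]
  | cons h t ih => simp [buildEdits, ih]

-- ===== VERDICT =====
theorem perform_affects_changes_spec : Claim_equal_perform_affects_changes := by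
  intro input _
  unfold Spec_perform_affects_changes perform_affects_changes perform_affects_changes_alt
  simp only
  rw [← stripBackgrounds_eq_foldl]
  set inp := stripBackgrounds input pyBackgroundChanges with hinp
  by_cases h : containsProduct inp = true
  · cases hfw : find_words pyPRODUCTS inp with
    | nil =>
        rw [find_words_nil_iff] at hfw
        obtain ⟨p, hp, hinf⟩ := (containsProduct_iff inp).mp h
        exact absurd hinf (hfw p hp)
    | cons a t =>
        rw [h]
        simp only [Bool.not_true, Bool.false_eq_true, if_false]
        exact buildEdits_eq input inp pySeasonChanges []
  · have hb : containsProduct inp = false := by simpa using h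
    have hnil : find_words pyPRODUCTS inp = [] := by
      rw [find_words_nil_iff]
      intro p hp hinf
      exact h ((containsProduct_iff inp).mpr ⟨p, hp, hinf⟩)
    rw [hnil, hb]
    rfl
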